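-- pv_equiv track=rewrite | github.com/Loquaxious/COSC121 | SuperQuiz 2/question8_n_days_at_activity_level.py | n_days_at_activity_level
-- ===== SOURCE A (Python) =====
-- def activity_level_from_steps(steps):
--     """Function determining activity level based on number of steps done"""
--     if (steps == 0):
--         state = 'alive?'
--     elif (steps < 5000):
--         state = 'sedentary'
--     elif (steps < 7500):
--         state = 'very low'
--     elif (steps < 10000):
--         state = 'low'
--     elif (steps < 12500):
--         state = 'active'
--     else:
--         state = 'very active'
--     return state
--
-- def n_days_at_activity_level(step_records, activity_level):
--     """Returns the number of days with the given activity level"""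
--     steps = []
--     for line in step_records:
--         steps.append(line[-1])
--     days = 0
--     for step in steps:
--         if activity_level == activity_level_from_steps(step):
--             days += 1
--     return days
-- ===== SOURCE B (Python) =====
-- def activity_level_from_steps(steps):
--     """Function determining activity level based on number of steps done"""
--     if (steps == 0):
--         state = 'alive?'
--     elif (steps < 5000):
--         state = 'sedentary'
--     elif (steps < 7500):
--         state = 'very low'
--     elif (steps < 10000):
--         state = 'low'
--     elif (steps < 12500):
--         state = 'active'
--     else:
--         state = 'very active'
--     return state
--
-- def n_days_at_activity_level(step_records, activity_level):
--     """Returns the number of days with the given activity level"""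
--     counts = {}
--     for line in step_records:
--         level = activity_level_from_steps(line[-1])
--         counts[level] = counts.get(level, 0) + 1
--     return counts.get(activity_level, 0)
-- ===== Notes on version B (the rewrite author's own statement) =====
-- stated objective: alternative
-- what changed: B builds a histogram (dict level -> count) over all records in one pass and answers the query by a final dict lookup, instead of A's two passes (collect last steps, then conditionally count per record against the queried level).
import Mathlib
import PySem

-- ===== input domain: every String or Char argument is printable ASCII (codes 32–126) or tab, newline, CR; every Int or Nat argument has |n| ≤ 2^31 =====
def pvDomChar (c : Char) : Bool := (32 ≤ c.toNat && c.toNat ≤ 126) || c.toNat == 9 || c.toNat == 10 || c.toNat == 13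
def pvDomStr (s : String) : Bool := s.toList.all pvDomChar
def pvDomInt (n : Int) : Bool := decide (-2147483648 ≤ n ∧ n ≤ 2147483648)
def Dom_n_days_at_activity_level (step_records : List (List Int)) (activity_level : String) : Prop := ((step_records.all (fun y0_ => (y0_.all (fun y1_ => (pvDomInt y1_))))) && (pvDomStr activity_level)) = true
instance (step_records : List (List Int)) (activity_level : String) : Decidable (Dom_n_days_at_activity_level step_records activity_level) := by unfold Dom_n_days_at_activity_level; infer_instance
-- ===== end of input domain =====

-- B builds a histogram dict (level -> count) in one pass and answers by a final lookup,
-- instead of A's two passes (collect last-column steps, then conditional counting); alternative decomposition, same cost.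


-- ===== PORT A =====
-- shared module helper activity_level_from_steps (identical in Source A and Source B)
def activity_level_from_steps (steps : Int) : String :=
  if steps == 0 then "alive?"
  else if steps < 5000 then "sedentary"
  else if steps < 7500 then "very low"
  else if steps < 10000 then "low"
  else if steps < 12500 then "active"
  else "very active"

-- line[-1]: PySem.List.pyGet?; none (= IndexError on an empty row) is excluded by Pre_, .getD 0 is never taken there
def n_days_at_activity_level (step_records : List (List Int)) (activity_level : String) : Int :=
  let steps := step_records.foldl (fun acc line => acc ++ [(PySem.List.pyGet? line (-1)).getD 0]) []
  steps.foldl (fun days step => if activity_level == activity_level_from_steps step then days + 1 else days) 0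

-- ===== PORT B =====
-- counts[level] = counts.get(level, 0) + 1  is  Dict.modify level 0 (· + 1)
def n_days_at_activity_level_alt (step_records : List (List Int)) (activity_level : String) : Int :=
  let counts := step_records.foldl
    (fun (d : PySem.Dict String Int) line =>
      d.modify (activity_level_from_steps ((PySem.List.pyGet? line (-1)).getD 0)) 0 (· + 1))
    PySem.Dict.empty
  counts.getD activity_level 0

-- ===== PRECONDITION & SPEC =====
-- Pre_ excludes inputs with an empty row, on which line[-1] raises IndexError in both A and B.
def Pre_n_days_at_activity_level (step_records : List (List Int)) (activity_level : String) : Prop :=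
  ∀ line ∈ step_records, line ≠ []
instance (step_records : List (List Int)) (activity_level : String) : Decidable (Pre_n_days_at_activity_level step_records activity_level) := by unfold Pre_n_days_at_activity_level; infer_instance
def pvWitness_n_days_at_activity_level : List (List Int) × String := ([[1, 3000], [12600]], "sedentary")

def Spec_n_days_at_activity_level (step_records : List (List Int)) (activity_level : String) (out : Int) : Prop := out = n_days_at_activity_level_alt step_records activity_level
instance (step_records : List (List Int)) (activity_level : String) (out : Int) : Decidable (Spec_n_days_at_activity_level step_records activity_level out) := by unfold Spec_n_days_at_activity_level; infer_instance

-- ===== CLAIM (what is proved, stated in full; the proofs are below) =====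
def Claim_equal_n_days_at_activity_level : Prop := ∀ (step_records : List (List Int)) (activity_level : String), Dom_n_days_at_activity_level step_records activity_level → Pre_n_days_at_activity_level step_records activity_level → Spec_n_days_at_activity_level step_records activity_level (n_days_at_activity_level step_records activity_level)

-- ===== LEMMAS AND PROOFS =====

theorem pv_count_foldl (l : List Int) (lvl : String) :
    l.foldl (fun days step => if lvl == activity_level_from_steps step then days + 1 else days) 0
      = ((l.map activity_level_from_steps).count lvl : Int) := by
  have h : ∀ (init : Int),
      l.foldl (fun days step => if lvl == activity_level_from_steps step then days + 1 else days) init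
        = init + ((l.map activity_level_from_steps).count lvl : Int) := by
    induction l with
    | nil => intro init; simp
    | cons x xs ih =>
      intro init
      simp only [List.foldl_cons, List.map_cons, List.count_cons, ih]
      by_cases hx : lvl = activity_level_from_steps x
      · simp [hx]; ring
      · have : (activity_level_from_steps x == lvl) = false := by
          simpa [beq_iff_eq] using fun h => hx h.symm
        simp [hx, this]
  simpa using h 0

-- ===== VERDICT (by name: the statement is the Claim_ definition above) =====
theorem n_days_at_activity_level_spec : Claim_equal_n_days_at_activity_level := by
  intro recs lvl _ _
  unfold Spec_n_days_at_activity_level n_days_at_activity_level n_days_at_activity_level_alt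
  simp only [PySem.List.foldl_append_singleton_eq_map]
  rw [pv_count_foldl]
  have hB : recs.foldl
      (fun (d : PySem.Dict String Int) line =>
        d.modify (activity_level_from_steps ((PySem.List.pyGet? line (-1)).getD 0)) 0 (· + 1))
      PySem.Dict.empty
    = (recs.map (fun line => activity_level_from_steps ((PySem.List.pyGet? line (-1)).getD 0))).foldl
        (fun (d : PySem.Dict String Int) x => d.modify x 0 (· + 1)) PySem.Dict.empty := by
    rw [List.foldl_map]
  rw [hB, PySem.Dict.getD_foldl_modify_add_one]
  simp [List.map_map, Function.comp_def]
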